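-- pv_equiv track=rewrite | github.com/luckyman94/Altegrad-competition | approach_graph_transformer/retrieval_sft.py | clean_generation
-- ===== SOURCE A (Python) =====
-- def clean_generation(text: str) -> str:
--     BAD_PREFIXES = [
--         "Description:",
--         "Examples",
--         "Example",
--         "You are",
--         "Write a",
--     ]
--     for p in BAD_PREFIXES:
--         if p in text:
--             text = text.split(p)[0].strip()
--     return text
-- ===== SOURCE B (Python) =====
-- def clean_generation(text: str) -> str:
--     BAD_PREFIXES = [
--         "Description:",
--         "Examples",
--         "Example",
--         "You are",
--         "Write a",
--     ]
--     hits = [i for i in (text.find(p) for p in BAD_PREFIXES) if i >= 0]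
--     if not hits:
--         return text
--     return text[:min(hits)].strip()
-- ===== Notes on version B (the rewrite author's own statement) =====
-- stated objective: simpler
-- what changed: Instead of repeatedly splitting and re-stripping the mutated text once per prefix, B computes every prefix's find() index in the original text, takes the minimum hit, and slices+strips exactly once (returning text untouched when no prefix occurs).
import Mathlib
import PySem

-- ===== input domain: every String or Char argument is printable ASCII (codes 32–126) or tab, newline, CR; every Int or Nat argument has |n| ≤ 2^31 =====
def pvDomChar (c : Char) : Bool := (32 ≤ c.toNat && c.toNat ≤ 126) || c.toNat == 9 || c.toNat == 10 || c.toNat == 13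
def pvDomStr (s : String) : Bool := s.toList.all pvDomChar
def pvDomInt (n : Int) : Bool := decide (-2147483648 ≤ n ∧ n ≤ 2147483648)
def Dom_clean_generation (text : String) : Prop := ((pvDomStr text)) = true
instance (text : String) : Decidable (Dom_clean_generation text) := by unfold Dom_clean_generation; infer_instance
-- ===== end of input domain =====

-- B computes every prefix's find() index in the original text once and slices+strips a single
-- time at the minimum hit, instead of A's repeated split-and-strip of the mutated text (simpler).

-- ===== PORT A =====
def pvBadA : List (List Char) :=
  ["Description:".toList, "Examples".toList, "Example".toList, "You are".toList, "Write a".toList]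
-- 'text.split(p)[0].strip()'; split with a nonempty separator never returns [], so [0] is headD
def pvStepA (t p : List Char) : List Char :=
  if PySem.Chars.isIn p t then PySem.Chars.strip ((PySem.Chars.splitOn t p).headD []) else t
def clean_generation (text : String) : String :=
  String.ofList (pvBadA.foldl pvStepA text.toList)

-- ===== PORT B =====
def pvBadB : List String := ["Description:", "Examples", "Example", "You are", "Write a"]
def clean_generation_alt (text : String) : String :=
  let hits := (pvBadB.map (fun p => PySem.Str.find text p)).filter (fun i => decide (0 ≤ i))
  match PySem.List.min? hits (fun i => i) with
  | none => text
  | some m => PySem.Str.strip (PySem.Str.slice text none (some m))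

-- ===== PRECONDITION & SPEC =====
def Spec_clean_generation (text : String) (out : String) : Prop := out = clean_generation_alt text
instance (text : String) (out : String) : Decidable (Spec_clean_generation text out) := by unfold Spec_clean_generation; infer_instance

-- ===== CLAIM (what is proved, stated in full; the proofs are below) =====
def Claim_equal_clean_generation : Prop := ∀ (text : String), Dom_clean_generation text → Spec_clean_generation text (clean_generation text)

-- ===== LEMMAS AND PROOFS =====

-- the running truncation point maintained by A's loop: `none` = no prefix found yet
def pvState (cs : List Char) (o : Option Nat) : List Char :=
  match o with
  | none => cs
  | some k => PySem.Chars.strip (cs.take k)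

-- how one pass of A's loop updates the truncation point, expressed on the ORIGINAL text
def pvUpd (cs : List Char) (o : Option Nat) (q : List Char) : Option Nat :=
  match o with
  | none => if 0 ≤ PySem.Chars.find cs q then some (PySem.Chars.find cs q).toNat else none
  | some k => if 0 ≤ PySem.Chars.find cs q ∧ (PySem.Chars.find cs q).toNat < k then
      some (PySem.Chars.find cs q).toNat else some k

def pvLead (u : List Char) : Nat := (u.takeWhile PySem.Chars.isspace).length

-- the step of B's running minimum (`min?` as a fold)
def pvMinStep (a : Option Int) (x : Int) : Option Int :=
  match a with
  | none => some x
  | some m => if x < m then some x else some m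


theorem pv_find_occ_iff (s sub : List Char) :
    (0 ≤ PySem.Chars.find s sub) ↔ ∃ j, sub <+: s.drop j := by
  rw [PySem.Chars.find_nonneg_iff, ← PySem.Chars.isIn_iff_infix, ← PySem.Chars.exists_prefix_drop_iff_isIn]

theorem pv_find_eq_of_first (s sub : List Char) (i : Nat) (h1 : sub <+: s.drop i)
    (h2 : ∀ j, j < i → ¬ sub <+: s.drop j) : PySem.Chars.find s sub = (i : Int) := by
  have hnn : 0 ≤ PySem.Chars.find s sub := (pv_find_occ_iff s sub).mpr ⟨i, h1⟩
  obtain ⟨hocc, hmin⟩ := PySem.Chars.find_spec hnn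
  have h3 : ¬ (PySem.Chars.find s sub).toNat < i := fun h => h2 _ h hocc
  have h4 : ¬ i < (PySem.Chars.find s sub).toNat := fun h => hmin i h h1
  omega

theorem pv_find_cons (c : Char) (rest sub : List Char) (h : ¬ sub <+: (c :: rest)) :
    PySem.Chars.find (c :: rest) sub =
      if PySem.Chars.find rest sub = -1 then -1 else PySem.Chars.find rest sub + 1 := by
  have hge := PySem.Chars.neg_one_le_find rest sub
  split_ifs with hneg
  · rw [PySem.Chars.find_eq_neg_one_iff, ← PySem.Chars.isIn_iff_infix,
      ← PySem.Chars.exists_prefix_drop_iff_isIn]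
    rintro ⟨j, hj⟩
    cases j with
    | zero => exact h (by simpa using hj)
    | succ j' =>
      have : sub <+: rest.drop j' := by simpa using hj
      have : 0 ≤ PySem.Chars.find rest sub := (pv_find_occ_iff rest sub).mpr ⟨j', this⟩
      omega
  · have hnn : 0 ≤ PySem.Chars.find rest sub := by omega
    obtain ⟨hocc, hmin⟩ := PySem.Chars.find_spec hnn
    have := pv_find_eq_of_first (c :: rest) sub ((PySem.Chars.find rest sub).toNat + 1)
      (by simpa using hocc)
      (by
        intro j hj
        cases j with
        | zero => simpa using h
        | succ j' => intro hp; exact hmin j' (by omega) (by simpa using hp))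
    omega


theorem pv_splitOn_go_headD (sep : List Char) :
    ∀ (fuel : Nat) (l cur : List Char) (acc : List (List Char)) (a : List Char),
      (PySem.Chars.splitOn.go sep fuel l cur (acc ++ [a])).headD [] = a := by
  intro fuel
  induction fuel with
  | zero =>
    intro l cur acc a
    rw [PySem.Chars.splitOn.go.eq_def]
    simp
  | succ f ih =>
    intro l cur acc a
    rw [PySem.Chars.splitOn.go.eq_def]
    cases l with
    | nil => simp
    | cons c rest =>
      simp only []
      split
      · have := ih (List.drop sep.length (c :: rest)) [] (cur.reverse :: acc) a
        simpa using this
      · exact ih rest (c :: cur) acc a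

theorem pv_splitOn_go_main (sep : List Char) (hsep : sep ≠ []) :
    ∀ (fuel : Nat) (l cur : List Char), l.length < fuel →
      (PySem.Chars.splitOn.go sep fuel l cur []).headD [] =
        if 0 ≤ PySem.Chars.find l sep then cur.reverse ++ l.take (PySem.Chars.find l sep).toNat
        else cur.reverse ++ l := by
  intro fuel
  induction fuel with
  | zero => intro l cur h; omega
  | succ f ih =>
    intro l cur h
    rw [PySem.Chars.splitOn.go.eq_def]
    cases l with
    | nil =>
      have hfind : PySem.Chars.find [] sep = -1 := by
        rw [PySem.Chars.find_eq_neg_one_iff]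
        intro hinf
        exact hsep (List.eq_nil_of_infix_nil hinf)
      simp [hfind]
    | cons c rest =>
      simp only []
      split
      · rename_i hpre
        have h0 : sep <+: (c :: rest).drop 0 := by simpa using List.isPrefixOf_iff_prefix.mp hpre
        have hfind : PySem.Chars.find (c :: rest) sep = 0 := by
          simpa using pv_find_eq_of_first (c :: rest) sep 0 h0 (by omega)
        have hh := pv_splitOn_go_headD sep f (List.drop sep.length (c :: rest)) [] [] cur.reverse
        simp only [List.nil_append] at hh
        rw [hh]
        simp [hfind]
      · rename_i hpre
        have hnp : ¬ sep <+: (c :: rest) := fun hp => hpre (List.isPrefixOf_iff_prefix.mpr hp)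
        have hfc := pv_find_cons c rest sep hnp
        have hge := PySem.Chars.neg_one_le_find rest sep
        rw [ih rest (c :: cur) (by simpa using Nat.lt_of_succ_lt_succ h)]
        by_cases hneg : PySem.Chars.find rest sep = -1
        · simp [hfc, hneg]
        · have hnn : 0 ≤ PySem.Chars.find rest sep := by omega
          rw [if_pos hnn, hfc, if_neg hneg, if_pos (by omega)]
          have ht : (PySem.Chars.find rest sep + 1).toNat = (PySem.Chars.find rest sep).toNat + 1 := by omega
          simp [ht, List.take_succ_cons]

theorem pv_splitOn_headD (cs sep : List Char) (hsep : sep ≠ []) :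
    (PySem.Chars.splitOn cs sep).headD [] =
      if 0 ≤ PySem.Chars.find cs sep then cs.take (PySem.Chars.find cs sep).toNat else cs := by
  have := pv_splitOn_go_main sep hsep (cs.length + 1) cs [] (by omega)
  simpa [PySem.Chars.splitOn] using this

theorem pv_dropWhile_eq_drop (p : Char → Bool) (l : List Char) :
    List.dropWhile p l = l.drop (l.takeWhile p).length := by
  induction l with
  | nil => rfl
  | cons c t ih =>
    by_cases hc : p c
    · simp [List.dropWhile_cons, List.takeWhile_cons, hc, ih]
    · simp [List.dropWhile_cons, List.takeWhile_cons, hc]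

theorem pv_lead_ws (u : List Char) (j : Nat) (hj : j < pvLead u) :
    ∃ h : j < u.length, PySem.Chars.isspace u[j] := by
  have hpre := List.takeWhile_prefix (l := u) (p := PySem.Chars.isspace)
  have hlen : j < u.length := lt_of_lt_of_le hj (hpre.length_le)
  refine ⟨hlen, ?_⟩
  have hg : u[j] = (u.takeWhile PySem.Chars.isspace)[j]'hj := (List.IsPrefix.getElem hpre hj).symm
  rw [hg]
  exact List.mem_takeWhile_imp (List.getElem_mem hj)

theorem pv_rstrip_prefix (v : List Char) : PySem.Chars.rstrip v <+: v := by
  have h := List.dropWhile_suffix (l := v.reverse) (p := PySem.Chars.isspace)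
  have := List.reverse_prefix.mpr h
  simpa [PySem.Chars.rstrip] using this

theorem pv_rstrip_tail_ws (v : List Char) (j : Nat) (hj1 : (PySem.Chars.rstrip v).length ≤ j)
    (hj2 : j < v.length) : PySem.Chars.isspace v[j] := by
  have hlen : (PySem.Chars.rstrip v).length = v.length - pvLead v.reverse := by
    simp [PySem.Chars.rstrip, pv_dropWhile_eq_drop, pvLead]
  have hi : v.length - 1 - j < pvLead v.reverse := by omega
  obtain ⟨hl, hws⟩ := pv_lead_ws v.reverse (v.length - 1 - j) hi
  rw [List.getElem_reverse] at hws
  have : v.length - 1 - (v.length - 1 - j) = j := by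
    have : v.reverse.length = v.length := by simp
    omega
  simpa [this] using hws

theorem pv_occ_rstrip_iff (v q : List Char) (i : Nat) (hq : q ≠ [])
    (hlast : ¬ PySem.Chars.isspace (q.getLastD ' ')) :
    q <+: (PySem.Chars.rstrip v).drop i ↔ q <+: v.drop i := by
  constructor
  · intro h
    exact h.trans (List.IsPrefix.drop (pv_rstrip_prefix v) i)
  · intro h
    have hqlen : 0 < q.length := List.length_pos_iff.mpr hq
    have hfit : i + q.length ≤ v.length := by
      have := h.length_le
      simp at this
      omega
    have hT : i + q.length ≤ (PySem.Chars.rstrip v).length := by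
      by_contra hc
      have hj2 : i + q.length - 1 < v.length := by omega
      have hws := pv_rstrip_tail_ws v (i + (q.length - 1)) (by omega) (by omega)
      have hgl : q.getLastD ' ' = q[q.length - 1]'(by omega) := by
        rw [List.getLastD_eq_getLast?]
        rw [List.getLast?_eq_getElem?]
        simp [List.getElem?_eq_getElem (by omega : q.length - 1 < q.length)]
      have hge : v[i + (q.length - 1)]'(by omega) = q[q.length - 1]'(by omega) := by
        have := List.IsPrefix.getElem h (i := q.length - 1) (by omega)
        rw [List.getElem_drop] at this
        exact this.symm
      rw [hge, ← hgl] at hws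
      exact hlast hws
    have htake : PySem.Chars.rstrip v = v.take (PySem.Chars.rstrip v).length :=
      List.prefix_iff_eq_take.mp (pv_rstrip_prefix v)
    rw [htake, List.drop_take]
    rw [List.prefix_take_iff]
    exact ⟨h, by omega⟩

theorem pv_occ_ge_lead (u q : List Char) (i : Nat) (hq : q ≠ [])
    (hhead : ¬ PySem.Chars.isspace (q.headD ' ')) (h : q <+: u.drop i) : pvLead u ≤ i := by
  by_contra hc
  obtain ⟨hl, hws⟩ := pv_lead_ws u i (by omega)
  have hqlen : 0 < q.length := List.length_pos_iff.mpr hq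
  have hh : q.headD ' ' = q[0] := by
    cases q with
    | nil => exact absurd rfl hq
    | cons a t => rfl
  have : u[i] = q[0] := by
    have := List.IsPrefix.getElem h (i := 0) (by omega)
    rw [List.getElem_drop] at this
    simpa using this.symm
  rw [this, ← hh] at hws
  exact hhead hws

theorem pv_occ_strip_iff (u q : List Char) (i : Nat) (hq : q ≠ [])
    (hhead : ¬ PySem.Chars.isspace (q.headD ' '))
    (hlast : ¬ PySem.Chars.isspace (q.getLastD ' ')) :
    q <+: (PySem.Chars.strip u).drop i ↔ q <+: u.drop (pvLead u + i) := by
  have h1 : PySem.Chars.strip u = PySem.Chars.rstrip (u.drop (pvLead u)) := by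
    simp [PySem.Chars.strip, PySem.Chars.lstrip, pv_dropWhile_eq_drop, pvLead]
  rw [h1, pv_occ_rstrip_iff _ q i hq hlast, List.drop_drop]


theorem pv_strip_drop_ws (s : List Char) (L : Nat)
    (h : ∀ j, j < L → ∀ hj : j < s.length, PySem.Chars.isspace s[j]) :
    PySem.Chars.strip (s.drop L) = PySem.Chars.strip s := by
  induction L generalizing s with
  | zero => simp
  | succ K ih =>
    cases s with
    | nil => simp
    | cons c t =>
      have hc : PySem.Chars.isspace c := by simpa using h 0 (by omega) (by simp)
      have h1 : PySem.Chars.strip (c :: t) = PySem.Chars.strip t := by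
        simp [PySem.Chars.strip, PySem.Chars.lstrip, List.dropWhile_cons, hc]
      have h2 := ih t (fun j hj hjl => by simpa using h (j+1) (by omega) (by simpa using hjl))
      simpa [h1] using h2

theorem pv_occ_take_iff (cs q : List Char) (k i : Nat) (hq : q ≠ []) :
    q <+: (cs.take k).drop i ↔ q <+: cs.drop i ∧ i + q.length ≤ k := by
  have hqlen : 0 < q.length := List.length_pos_iff.mpr hq
  rw [List.drop_take, List.prefix_take_iff]
  constructor
  · rintro ⟨h1, h2⟩; exact ⟨h1, by omega⟩
  · rintro ⟨h1, h2⟩; exact ⟨h1, by omega⟩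

theorem pv_good (q : List Char) (hq : q ∈ pvBadA) :
    q ≠ [] ∧ ¬ PySem.Chars.isspace (q.headD ' ') ∧ ¬ PySem.Chars.isspace (q.getLastD ' ') := by
  fin_cases hq <;> refine ⟨by decide, by decide, by decide⟩

theorem pv_head_initial (r : List Char) (hr : r ∈ pvBadA) :
    r.headD ' ' = 'D' ∨ r.headD ' ' = 'E' ∨ r.headD ' ' = 'Y' ∨ r.headD ' ' = 'W' := by
  fin_cases hr <;> simp

theorem pv_non_initial (q : List Char) (hq : q ∈ pvBadA) :
    ∀ d (hd : d < q.length), 0 < d →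
      ¬ (q[d]'hd = 'D' ∨ q[d]'hd = 'E' ∨ q[d]'hd = 'Y' ∨ q[d]'hd = 'W') := by
  fin_cases hq <;> decide

theorem pv_sep (cs q r : List Char) (i j : Nat) (hq : q ∈ pvBadA) (hr : r ∈ pvBadA)
    (hoq : q <+: cs.drop i) (hor : r <+: cs.drop j) (hij : i < j) : i + q.length ≤ j := by
  by_contra hc
  have hqlen : 0 < q.length := by
    fin_cases hq <;> simp
  have hrlen : 0 < r.length := by
    fin_cases hr <;> simp
  have hd : j - i < q.length := by omega
  have hjlen : j < cs.length := by
    have := hor.length_le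
    simp at this
    omega
  have e1 : cs[j] = q[j - i]'hd := by
    have h5 := List.IsPrefix.getElem hoq (i := j - i) hd
    rw [List.getElem_drop] at h5
    rw [h5]
    exact getElem_congr rfl (by omega) (by omega)
  have e2 : cs[j] = r.headD ' ' := by
    have h6 := List.IsPrefix.getElem hor (i := 0) (by omega)
    rw [List.getElem_drop] at h6
    have hh : r.headD ' ' = r[0] := by
      cases r with
      | nil => simp at hrlen
      | cons a t => rfl
    rw [hh, h6]
    exact getElem_congr rfl (by omega) (by omega)
  have := pv_non_initial q hq (j - i) hd (by omega)
  rw [← e1, e2] at this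
  exact this (pv_head_initial r hr)

theorem pv_step_none (cs q : List Char) (hq : q ∈ pvBadA) :
    pvStepA cs q = pvState cs (pvUpd cs none q) := by
  obtain ⟨hqne, -, -⟩ := pv_good q hq
  have hge := PySem.Chars.neg_one_le_find cs q
  by_cases hnn : 0 ≤ PySem.Chars.find cs q
  · have hisIn : PySem.Chars.isIn q cs = true := by
      simp only [PySem.Chars.isIn, bne_iff_ne, ne_eq]
      omega
    simp only [pvStepA, hisIn, if_true, pvUpd, hnn, if_pos, pvState,
      pv_splitOn_headD cs q hqne, if_pos hnn]
  · have hisIn : PySem.Chars.isIn q cs = false := by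
      simp only [PySem.Chars.isIn, bne_eq_false_iff_eq]
      omega
    simp [pvStepA, hisIn, pvUpd, hnn, pvState]

theorem pv_step_some (cs q : List Char) (k : Nat) (hk : k ≤ cs.length)
    (hocc : ∃ r ∈ pvBadA, r <+: cs.drop k) (hq : q ∈ pvBadA) :
    pvStepA (PySem.Chars.strip (cs.take k)) q = pvState cs (pvUpd cs (some k) q) := by
  obtain ⟨hqne, hqh, hql⟩ := pv_good q hq
  obtain ⟨r, hr, hrocc⟩ := hocc
  have hqlen : 0 < q.length := List.length_pos_iff.mpr hqne
  have hgeq := PySem.Chars.neg_one_le_find cs q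
  set u := cs.take k with hu
  set L := pvLead u with hL
  set t := PySem.Chars.strip u with ht
  have hoccT : ∀ i, q <+: t.drop i ↔ (q <+: cs.drop (L + i) ∧ (L + i) + q.length ≤ k) := by
    intro i
    rw [ht, pv_occ_strip_iff u q i hqne hqh hql, hu, pv_occ_take_iff cs q k (L + i) hqne]
  by_cases c1 : 0 ≤ PySem.Chars.find cs q ∧ (PySem.Chars.find cs q).toNat < k
  · obtain ⟨hnn, hlt⟩ := c1
    set m := (PySem.Chars.find cs q).toNat with hm
    obtain ⟨hoccm, hminm⟩ := PySem.Chars.find_spec hnn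
    have hfit : m + q.length ≤ k := pv_sep cs q r m k hq hr hoccm hrocc hlt
    have hLm : L ≤ m := by
      refine pv_occ_ge_lead u q m hqne hqh ?_
      rw [hu, pv_occ_take_iff cs q k m hqne]
      exact ⟨hoccm, hfit⟩
    have hoT : q <+: t.drop (m - L) := by
      rw [hoccT]
      constructor
      · have e : L + (m - L) = m := by omega
        rw [e]; exact hoccm
      · omega
    have hfT : PySem.Chars.find t q = ((m - L : Nat) : Int) := by
      apply pv_find_eq_of_first _ _ _ hoT
      intro j hj hpj
      rw [hoccT] at hpj
      exact hminm (L + j) (by omega) hpj.1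
    have hisIn : PySem.Chars.isIn q t = true := by
      simp only [PySem.Chars.isIn, bne_iff_ne, ne_eq, hfT]
      omega
    have hTlen : m - L + q.length ≤ t.length := by
      have := hoT.length_le
      simp only [List.length_drop] at this
      omega
    have htp : t = (u.drop L).take t.length := by
      have e : t = PySem.Chars.rstrip (u.drop L) := by
        rw [ht, hL]
        simp [PySem.Chars.strip, PySem.Chars.lstrip, pv_dropWhile_eq_drop, pvLead]
      calc t = PySem.Chars.rstrip (u.drop L) := e
        _ = (u.drop L).take (PySem.Chars.rstrip (u.drop L)).length :=
            List.prefix_iff_eq_take.mp (pv_rstrip_prefix (u.drop L))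
        _ = (u.drop L).take t.length := by rw [← e]
    have e3 : t.take (m - L) = (cs.take m).drop L := by
      have hX : u.drop L = (cs.drop L).take (k - L) := by rw [hu, List.drop_take]
      rw [List.drop_take]
      conv_lhs => rw [htp, hX]
      rw [List.take_take, List.take_take]
      congr 1
      omega
    have hcsws : ∀ j, j < L → ∀ hjc : j < cs.length, PySem.Chars.isspace cs[j] := by
      intro j hj hjc
      obtain ⟨hju, hws⟩ := pv_lead_ws u j (by omega)
      have e9 : u[j]'hju = cs[j]'hjc := by
        simp only [hu, List.getElem_take]
      rw [← e9]
      exact hws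
    have e6 : PySem.Chars.strip ((cs.take m).drop L) = PySem.Chars.strip (cs.take m) := by
      apply pv_strip_drop_ws
      intro j hj hjl
      have h10 : (cs.take m)[j]'hjl = cs[j]'(by simp at hjl; omega) := List.getElem_take
      rw [h10]
      exact hcsws j hj _
    have hupd : pvUpd cs (some k) q = some m := by
      simp only [pvUpd, hm]
      rw [if_pos ⟨hnn, hlt⟩]
    rw [hupd]
    simp only [pvStepA, hisIn, if_true, pvState]
    rw [pv_splitOn_headD t q hqne, hfT, if_pos (by omega : (0:Int) ≤ ((m - L : Nat) : Int))]
    rw [Int.toNat_natCast, e3, e6]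
  · have hfT : PySem.Chars.find t q = -1 := by
      rw [PySem.Chars.find_eq_neg_one_iff, ← PySem.Chars.isIn_iff_infix,
        ← PySem.Chars.exists_prefix_drop_iff_isIn]
      rintro ⟨i, hi⟩
      rw [hoccT] at hi
      obtain ⟨hio, hif⟩ := hi
      have hnn : 0 ≤ PySem.Chars.find cs q := (pv_find_occ_iff cs q).mpr ⟨L + i, hio⟩
      obtain ⟨hoccm, hminm⟩ := PySem.Chars.find_spec hnn
      have hle : (PySem.Chars.find cs q).toNat ≤ L + i := by
        by_contra hc
        exact hminm (L + i) (by omega) hio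
      exact c1 ⟨hnn, by omega⟩
    have hisIn : PySem.Chars.isIn q t = false := by
      simp only [PySem.Chars.isIn, bne_eq_false_iff_eq, hfT]
    have hupd : pvUpd cs (some k) q = some k := by
      simp only [pvUpd]
      rw [if_neg c1]
    rw [hupd]
    simp only [pvStepA, hisIn, Bool.false_eq_true, if_false, pvState]
    rw [ht, hu]

theorem pv_upd_inv (cs : List Char) (o : Option Nat) (q : List Char) (hq : q ∈ pvBadA)
    (ho : ∀ k, o = some k → k ≤ cs.length ∧ ∃ r ∈ pvBadA, r <+: cs.drop k) :
    ∀ k, pvUpd cs o q = some k → k ≤ cs.length ∧ ∃ r ∈ pvBadA, r <+: cs.drop k := by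
  intro k hk
  have hnewcase : (0 ≤ PySem.Chars.find cs q ∧ k = (PySem.Chars.find cs q).toNat) ∨ o = some k := by
    cases o with
    | none =>
      simp only [pvUpd] at hk
      split at hk
      · exact Or.inl ⟨by assumption, by injection hk with h; omega⟩
      · cases hk
    | some k' =>
      simp only [pvUpd] at hk
      split at hk
      · rename_i hcond
        exact Or.inl ⟨hcond.1, by injection hk with h; omega⟩
      · exact Or.inr (by injection hk with h; rw [h])
  rcases hnewcase with ⟨hnn, hkeq⟩ | hold
  · obtain ⟨hocc, -⟩ := PySem.Chars.find_spec hnn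
    have hle := PySem.Chars.find_le_length cs q
    refine ⟨by omega, q, hq, by rw [hkeq]; exact hocc⟩
  · exact ho k hold

theorem pv_core (cs : List Char) (Q : List (List Char)) (hQ : ∀ q ∈ Q, q ∈ pvBadA) :
    ∀ (o : Option Nat),
      (∀ k, o = some k → k ≤ cs.length ∧ ∃ r ∈ pvBadA, r <+: cs.drop k) →
      Q.foldl pvStepA (pvState cs o) = pvState cs (Q.foldl (pvUpd cs) o) := by
  induction Q with
  | nil => intro o ho; rfl
  | cons q Q' ih =>
    intro o ho
    have hq : q ∈ pvBadA := hQ q List.mem_cons_self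
    have hstep : pvStepA (pvState cs o) q = pvState cs (pvUpd cs o q) := by
      cases o with
      | none => exact pv_step_none cs q hq
      | some k =>
        obtain ⟨hk, hocc⟩ := ho k rfl
        exact pv_step_some cs q k hk hocc hq
    simp only [List.foldl_cons, hstep]
    exact ih (fun r hr => hQ r (List.mem_cons_of_mem q hr)) (pvUpd cs o q)
      (pv_upd_inv cs o q hq ho)

theorem pv_fold_rel (cs : List Char) :
    ∀ (Q : List (List Char)) (o : Option Nat),
      Q.foldl (fun (a : Option Int) q =>
          if 0 ≤ PySem.Chars.find cs q then pvMinStep a (PySem.Chars.find cs q) else a)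
        (o.map (fun n : Nat => (n : Int)))
      = (Q.foldl (pvUpd cs) o).map (fun n : Nat => (n : Int)) := by
  intro Q
  induction Q with
  | nil => intro o; rfl
  | cons q Q' ih =>
    intro o
    simp only [List.foldl_cons]
    have hstep :
        (if 0 ≤ PySem.Chars.find cs q then pvMinStep (o.map (fun n : Nat => (n : Int)))
            (PySem.Chars.find cs q)
          else o.map (fun n : Nat => (n : Int)))
        = (pvUpd cs o q).map (fun n : Nat => (n : Int)) := by
      cases o with
      | none =>
        simp only [Option.map_none, pvUpd, pvMinStep]
        split_ifs with h
        · simp [Int.toNat_of_nonneg h]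
        · simp
      | some k =>
        simp only [Option.map_some, pvUpd, pvMinStep]
        by_cases h : 0 ≤ PySem.Chars.find cs q
        · rw [if_pos h]
          by_cases h2 : PySem.Chars.find cs q < (k : Int)
          · rw [if_pos h2, if_pos ⟨h, by omega⟩]
            simp [Int.toNat_of_nonneg h]
          · rw [if_neg h2, if_neg (by omega)]
            simp
        · rw [if_neg h, if_neg (by omega)]
          simp
    rw [hstep]
    exact ih (pvUpd cs o q)

theorem pv_altB (text : String) :
    clean_generation_alt text =
      String.ofList (pvState text.toList (pvBadA.foldl (pvUpd text.toList) none)) := by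
  rw [show clean_generation_alt text = (match PySem.List.min?
      ((pvBadB.map (fun p => PySem.Str.find text p)).filter (fun i => decide (0 ≤ i)))
      (fun i => i) with
    | none => text
    | some m => PySem.Str.strip (PySem.Str.slice text none (some m))) from rfl]
  have hmin : PySem.List.min?
      ((pvBadB.map (fun p => PySem.Str.find text p)).filter (fun i => decide (0 ≤ i)))
      (fun i => i)
      = (pvBadA.foldl (pvUpd text.toList) none).map (fun n : Nat => (n : Int)) := by
    have h1 : PySem.List.min?
        ((pvBadB.map (fun p => PySem.Str.find text p)).filter (fun i => decide (0 ≤ i)))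
        (fun i => i)
        = ((pvBadB.map (fun p => PySem.Str.find text p)).filter
            (fun i => decide (0 ≤ i))).foldl pvMinStep none := by
      rw [PySem.List.min?]
      exact PySem.List.foldl_congr_mem _ _ _ _ (fun a x _ => by cases a <;> rfl)
    rw [h1, ← PySem.List.foldl_if_eq_foldl_filter (fun i => decide (0 ≤ i)) pvMinStep,
      List.foldl_map]
    have h2 := pv_fold_rel text.toList pvBadA none
    have hAB : pvBadA = pvBadB.map String.toList := rfl
    rw [hAB, List.foldl_map, List.foldl_map] at h2
    simp only [Option.map_none] at h2
    rw [hAB, List.foldl_map, ← h2]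
    apply PySem.List.foldl_congr_mem
    intro a q _
    have hfind : PySem.Str.find text q = PySem.Chars.find text.toList q.toList := rfl
    by_cases h : 0 ≤ PySem.Chars.find text.toList q.toList
    · rw [hfind]
      rw [if_pos (by simpa using h), if_pos h]
    · rw [hfind]
      rw [if_neg (by simpa using h), if_neg h]
  rw [hmin]
  cases hF : pvBadA.foldl (pvUpd text.toList) none with
  | none => simp [pvState, String.ofList_toList]
  | some k =>
    simp only [Option.map_some, pvState]
    rw [PySem.Str.slice, PySem.Str.strip]
    refine congrArg String.ofList ?_
    rw [String.toList_ofList]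
    refine congrArg PySem.Chars.strip ?_
    rw [PySem.Chars.slice_eq_listSlice, PySem.List.slice_to _ (Int.natCast_nonneg k),
      Int.toNat_natCast]

-- ===== VERDICT (by name: the statement is the Claim_ definition above) =====
theorem clean_generation_spec : Claim_equal_clean_generation := by
  intro text _
  unfold Spec_clean_generation
  rw [pv_altB]
  unfold clean_generation
  have h := pv_core text.toList pvBadA (fun q hq => hq) none (by intro k hk; cases hk)
  simp only [pvState] at h
  rw [h]
  rfl
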